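-- pv_equiv track=rewrite | github.com/AURA-99999999999/Major-Project | backend/services/music_filter.py | _process_artist_name
-- ===== SOURCE A (Python) =====
-- from typing import List, Dict, Optional
--
-- def _process_artist_name(name: str) -> Optional[str]:
--     """
--     Process and normalize artist name:
--     - Remove suffixes: "- Topic", "Official", "VEVO", "Release - Topic"
--     - Remove trailing spaces and dashes
--     - Block certain channels: "Release - Topic"
--
--     Args:
--         name: Raw artist name
--
--     Returns:
--         Normalized artist name or None if it's a blocklisted channel
--     """
--     if not name or not isinstance(name, str):
--         return None
--
--     name = name.strip()
--
--     # Blocklist certain channels/labels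
--     blocklist = [
--         'Release - Topic',
--         'Topic',
--         '[Topic]',
--     ]
--
--     if name in blocklist or name.lower() in [b.lower() for b in blocklist]:
--         return None
--
--     # Remove suffixes (case-insensitive)
--     # Order matters - remove compound suffixes first
--     suffixes_to_remove = [
--         ' - Topic',
--         '- Topic',
--         ' - Official',
--         '- Official',
--         ' Official',
--         ' - VEVO',
--         '- VEVO',
--         ' VEVO',
--     ]
--
--     for suffix in suffixes_to_remove:
--         if name.lower().endswith(suffix.lower()):
--             name = name[:-len(suffix)].strip()
--             break  # Only remove one suffix
--
--     name = name.strip().rstrip('-').strip()  # Remove any trailing dashes/spaces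
--
--     # Ensure name is not empty after processing
--     if not name or len(name) < 2:
--         return None
--
--     return name
-- ===== SOURCE B (Python) =====
-- def _process_artist_name(name):
--     if not name or not isinstance(name, str):
--         return None
--     name = name.strip()
--     low = name.lower()
--     if low in ('release - topic', 'topic', '[topic]'):
--         return None
--     # one backward scan: find which keyword ends the string, then how much separator to cut
--     for word in ('topic', 'official', 'vevo'):
--         if low.endswith(word):
--             head = low[:len(low) - len(word)]
--             if head.endswith('- '):
--                 name = name[:len(name) - len(word) - 2].strip()
--             elif word != 'topic' and head.endswith(' '):
--                 name = name[:len(name) - len(word) - 1].strip()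
--             break
--     name = name.strip().rstrip('-').strip()
--     if len(name) < 2:
--         return None
--     return name
-- ===== Notes on version B (the rewrite author's own statement) =====
-- stated objective: simpler
-- what changed: A scans an eight-entry case-lowered suffix list with endswith for each; B lowercases once and checks only the three keywords (topic/official/vevo) at the end of the string, then inspects the separator characters immediately before the keyword to decide how much to cut.
import Mathlib
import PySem

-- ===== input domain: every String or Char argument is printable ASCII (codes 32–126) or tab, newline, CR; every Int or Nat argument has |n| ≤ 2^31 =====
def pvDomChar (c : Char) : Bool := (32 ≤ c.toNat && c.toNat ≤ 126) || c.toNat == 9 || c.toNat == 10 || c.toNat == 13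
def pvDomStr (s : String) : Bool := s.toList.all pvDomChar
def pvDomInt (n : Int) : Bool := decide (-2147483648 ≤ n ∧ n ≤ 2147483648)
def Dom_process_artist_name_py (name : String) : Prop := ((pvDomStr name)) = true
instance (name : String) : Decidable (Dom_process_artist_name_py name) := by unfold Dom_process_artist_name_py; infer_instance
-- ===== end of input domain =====

-- B replaces A's eight-entry suffix-list scan by a three-keyword check at the end of the
-- lowercased string plus a look at the separator characters just before the keyword (objective: simpler).

-- ===== PORT A =====
-- hand port of Python's s.rstrip('-') (only '-' stripped from the right); exact: dropWhile '-' on the reversed list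
def paRstripDash (s : String) : String :=
  String.ofList ((s.toList.reverse.dropWhile (· == '-')).reverse)

def paSuffixes : List String :=
  [" - Topic", "- Topic", " - Official", "- Official", " Official", " - VEVO", "- VEVO", " VEVO"]

-- the 'for suffix in suffixes_to_remove: … break' loop: first match wins
def paLoop (name : String) : List String → String
  | [] => name
  | suf :: rest =>
    if PySem.Str.endswith (PySem.Str.lower name) (PySem.Str.lower suf) then
      PySem.Str.strip (PySem.Str.slice name none (some (-(PySem.Str.len suf : Int))))
    else paLoop name rest

def process_artist_name_py (name : String) : Option String :=
  if name == "" then none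
  else
    let name1 := PySem.Str.strip name
    let blocklist : List String := ["Release - Topic", "Topic", "[Topic]"]
    if blocklist.contains name1
        || (blocklist.map PySem.Str.lower).contains (PySem.Str.lower name1) then none
    else
      let name2 := paLoop name1 paSuffixes
      let name3 := PySem.Str.strip (paRstripDash (PySem.Str.strip name2))
      if name3 == "" || (PySem.Str.len name3 : Int) < 2 then none
      else some name3

-- ===== PORT B =====
-- hand port of Python's s.rstrip('-') (only '-' stripped from the right); exact: dropWhile '-' on the reversed list
def pbRstripDash (s : String) : String :=
  String.ofList ((s.toList.reverse.dropWhile (· == '-')).reverse)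

def pbWords : List String := ["topic", "official", "vevo"]

-- B's loop: keyword at the end of the lowercased name, then inspect the separator just before it
def pbLoop (name low : String) : List String → String
  | [] => name
  | word :: rest =>
    if PySem.Str.endswith low word then
      let head := PySem.Str.slice low none (some ((PySem.Str.len low : Int) - (PySem.Str.len word : Int)))
      if PySem.Str.endswith head "- " then
        PySem.Str.strip (PySem.Str.slice name none (some ((PySem.Str.len name : Int) - (PySem.Str.len word : Int) - 2)))
      else if word != "topic" && PySem.Str.endswith head " " then
        PySem.Str.strip (PySem.Str.slice name none (some ((PySem.Str.len name : Int) - (PySem.Str.len word : Int) - 1)))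
      else name
    else pbLoop name low rest

def process_artist_name_py_alt (name : String) : Option String :=
  if name == "" then none
  else
    let name1 := PySem.Str.strip name
    let low := PySem.Str.lower name1
    if [("release - topic" : String), "topic", "[topic]"].contains low then none
    else
      let name2 := pbLoop name1 low pbWords
      let name3 := PySem.Str.strip (pbRstripDash (PySem.Str.strip name2))
      if (PySem.Str.len name3 : Int) < 2 then none
      else some name3

-- ===== PRECONDITION & SPEC =====
def Spec_process_artist_name_py (name : String) (out : Option String) : Prop := out = process_artist_name_py_alt name
instance (name : String) (out : Option String) : Decidable (Spec_process_artist_name_py name out) := by unfold Spec_process_artist_name_py; infer_instance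

-- ===== CLAIM (what is proved, stated in full; the proofs are below) =====
def Claim_equal_process_artist_name_py : Prop := ∀ (name : String), Dom_process_artist_name_py name → Spec_process_artist_name_py name (process_artist_name_py name)

-- ===== LEMMAS AND PROOFS =====

theorem char_toNat_ofNat (n : Nat) (h : Nat.isValidChar n) : (Char.ofNat n).toNat = n := by
  unfold Char.ofNat
  rw [dif_pos h]
  unfold Char.ofNatAux Char.toNat
  simp [UInt32.toNat_ofNatLT]

theorem lowerChar_space (c : Char) (h : PySem.Chars.lowerChar c = ' ') : c = ' ' := by
  unfold PySem.Chars.lowerChar PySem.Chars.isupper at h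
  by_cases hu : (decide ('A' ≤ c) && decide (c ≤ 'Z')) = true
  · exfalso
    rw [if_pos hu] at h
    simp only [Bool.and_eq_true, decide_eq_true_eq] at hu
    have h1 : 65 ≤ c.toNat := hu.1
    have h2 : c.toNat ≤ 90 := hu.2
    have hv : Nat.isValidChar (c.toNat + 32) := Or.inl (by omega)
    have h3 := char_toNat_ofNat (c.toNat + 32) hv
    rw [h] at h3
    have h4 : (' ' : Char).toNat = 32 := rfl
    omega
  · rw [if_neg hu] at h; exact h

theorem suffix_split {α : Type} (l w a : List α) :
    ((a ++ w) <:+ l) ↔ (w <:+ l ∧ a <:+ l.take (l.length - w.length)) := by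
  constructor
  · intro h
    obtain ⟨p, hp⟩ := h
    have hw : w <:+ l := ⟨p ++ a, by simp [← hp]⟩
    refine ⟨hw, ?_⟩
    have hlen : l.length - w.length = (p ++ a).length := by
      subst hp; simp; omega
    have ht : l.take (l.length - w.length) = p ++ a := by
      rw [hlen, ← hp, show p ++ (a ++ w) = (p ++ a) ++ w by simp]
      exact List.take_left
    rw [ht]; exact ⟨p, rfl⟩
  · rintro ⟨hw, ha⟩
    obtain ⟨r, hr⟩ := ha
    have hd : l = l.take (l.length - w.length) ++ w := by
      conv_lhs => rw [← List.take_append_drop (l.length - w.length) l]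
      rw [← List.suffix_iff_eq_drop.mp hw]
    exact ⟨r, by rw [hd, ← hr]; simp⟩

theorem strip_concat_space (xs : List Char) (c : Char) (h : PySem.Chars.isspace c = true) :
    PySem.Chars.strip (xs ++ [c]) = PySem.Chars.strip xs := by
  unfold PySem.Chars.strip PySem.Chars.lstrip PySem.Chars.rstrip
  rw [List.dropWhile_append]
  by_cases he : (List.dropWhile PySem.Chars.isspace xs).isEmpty
  · rw [if_pos he, show List.dropWhile PySem.Chars.isspace [c] = [] by simp [h]]
    rw [List.isEmpty_iff.mp he]
  · rw [if_neg he, List.reverse_append, List.reverse_singleton, List.singleton_append,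
      List.dropWhile_cons_of_pos h]

-- the crux of the compound-suffix cases: if ' '·w is a suffix of lower(n), cutting |w|+1 or |w|
-- characters from n gives the same stripped result (the extra character is the space itself)
theorem strip_take_eq_of_space_suffix (n w : List Char)
    (hw : (' ' :: w) <:+ PySem.Chars.lower n) :
    PySem.Chars.strip (n.take (n.length - (w.length + 1)))
      = PySem.Chars.strip (n.take (n.length - w.length)) := by
  unfold PySem.Chars.lower at hw
  rw [List.suffix_map_iff] at hw
  obtain ⟨u, hu, hmap⟩ := hw
  match u, hmap with
  | c :: u', hmap =>
    simp only [List.map_cons, List.cons.injEq] at hmap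
    have hc : c = ' ' := lowerChar_space c hmap.1.symm
    obtain ⟨p, hp⟩ := hu
    have hlen : u'.length = w.length := by rw [hmap.2]; simp
    have hn : n.length = p.length + (w.length + 1) := by
      rw [← hp]; simp; omega
    have h1 : n.take (n.length - (w.length + 1)) = p := by
      rw [← hp, show (p ++ c :: u').length - (w.length + 1) = p.length by simp; omega]
      exact List.take_left
    have h2 : n.take (n.length - w.length) = p ++ [c] := by
      rw [← hp, show (p ++ c :: u').length - w.length = p.length + 1 by simp; omega]
      rw [show p ++ c :: u' = (p ++ [c]) ++ u' by simp]
      rw [List.take_append_of_le_length (by simp)]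
      simp
    rw [h1, h2, hc, strip_concat_space _ _ (by decide)]

theorem slice_to_nonneg {α : Type} (xs : List α) (t : Int) (h0 : 0 ≤ t) :
    PySem.List.slice xs none (some t) = xs.take t.toNat := by
  show List.take (PySem.List.clampIdx xs.length t - 0) (List.drop 0 xs) = _
  unfold PySem.List.clampIdx
  rw [if_neg (by omega)]
  simp only [Nat.sub_zero, List.drop_zero]
  rcases Nat.le_total t.toNat xs.length with h | h
  · rw [min_eq_left h]
  · rw [min_eq_right h, List.take_of_length_le h, List.take_of_length_le (le_refl _)]

theorem slice_to_neg {α : Type} (xs : List α) (k : Nat) (hk0 : 0 < k) (hk : k ≤ xs.length) :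
    PySem.List.slice xs none (some (-(k : Int))) = xs.take (xs.length - k) := by
  show List.take (PySem.List.clampIdx xs.length (-(k : Int)) - 0) (List.drop 0 xs) = _
  unfold PySem.List.clampIdx
  rw [if_pos (by omega), if_neg (by omega)]
  simp only [Nat.sub_zero, List.drop_zero]
  congr 1
  omega

theorem core_loop (name1 : String) :
    paLoop name1 paSuffixes = pbLoop name1 (PySem.Str.lower name1) pbWords := by
  have hlow : (PySem.Str.lower name1).toList = PySem.Chars.lower name1.toList := by
    rw [PySem.Str.lower, String.toList_ofList]
  set n := name1.toList with hndef
  set L := PySem.Chars.lower n with hLdef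
  have hLlen : L.length = n.length := by
    rw [hLdef, PySem.Chars.lower]; exact List.length_map ..
  have ew : ∀ (s w : List Char), PySem.Chars.endswith s w = decide (w <:+ s) := by
    intro s w
    by_cases h : w <:+ s
    · rw [decide_eq_true h]; exact (PySem.Chars.endswith_iff s w).mpr h
    · rw [decide_eq_false h, Bool.eq_false_iff]
      exact fun hc => h ((PySem.Chars.endswith_iff s w).mp hc)
  have hEnd : ∀ (s w : String), PySem.Str.endswith s w = decide (w.toList <:+ s.toList) := by
    intro s w; rw [PySem.Str.endswith, ew]
  -- literal evaluations
  have lw1 : PySem.Str.lower " - Topic" = " - topic" := rfl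
  have lw2 : PySem.Str.lower "- Topic" = "- topic" := rfl
  have lw3 : PySem.Str.lower " - Official" = " - official" := rfl
  have lw4 : PySem.Str.lower "- Official" = "- official" := rfl
  have lw5 : PySem.Str.lower " Official" = " official" := rfl
  have lw6 : PySem.Str.lower " - VEVO" = " - vevo" := rfl
  have lw7 : PySem.Str.lower "- VEVO" = "- vevo" := rfl
  have lw8 : PySem.Str.lower " VEVO" = " vevo" := rfl
  have tl1 : (" - topic" : String).toList = [' ', '-', ' ', 't', 'o', 'p', 'i', 'c'] := rfl
  have tl2 : ("- topic" : String).toList = ['-', ' ', 't', 'o', 'p', 'i', 'c'] := rfl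
  have tl3 : (" - official" : String).toList = [' ', '-', ' ', 'o', 'f', 'f', 'i', 'c', 'i', 'a', 'l'] := rfl
  have tl4 : ("- official" : String).toList = ['-', ' ', 'o', 'f', 'f', 'i', 'c', 'i', 'a', 'l'] := rfl
  have tl5 : (" official" : String).toList = [' ', 'o', 'f', 'f', 'i', 'c', 'i', 'a', 'l'] := rfl
  have tl6 : (" - vevo" : String).toList = [' ', '-', ' ', 'v', 'e', 'v', 'o'] := rfl
  have tl7 : ("- vevo" : String).toList = ['-', ' ', 'v', 'e', 'v', 'o'] := rfl
  have tl8 : (" vevo" : String).toList = [' ', 'v', 'e', 'v', 'o'] := rfl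
  have tl9 : ("topic" : String).toList = ['t', 'o', 'p', 'i', 'c'] := rfl
  have tl10 : ("official" : String).toList = ['o', 'f', 'f', 'i', 'c', 'i', 'a', 'l'] := rfl
  have tl11 : ("vevo" : String).toList = ['v', 'e', 'v', 'o'] := rfl
  have tl12 : ("- " : String).toList = ['-', ' '] := rfl
  have tl13 : (" " : String).toList = [' '] := rfl
  have ln1 : PySem.Str.len " - Topic" = ((8 : Nat) : Int) := rfl
  have ln2 : PySem.Str.len "- Topic" = ((7 : Nat) : Int) := rfl
  have ln3 : PySem.Str.len " - Official" = ((11 : Nat) : Int) := rfl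
  have ln4 : PySem.Str.len "- Official" = ((10 : Nat) : Int) := rfl
  have ln5 : PySem.Str.len " Official" = ((9 : Nat) : Int) := rfl
  have ln6 : PySem.Str.len " - VEVO" = ((7 : Nat) : Int) := rfl
  have ln7 : PySem.Str.len "- VEVO" = ((6 : Nat) : Int) := rfl
  have ln8 : PySem.Str.len " VEVO" = ((5 : Nat) : Int) := rfl
  have ln9 : PySem.Str.len "topic" = ((5 : Nat) : Int) := rfl
  have ln10 : PySem.Str.len "official" = ((8 : Nat) : Int) := rfl
  have ln11 : PySem.Str.len "vevo" = ((4 : Nat) : Int) := rfl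
  have lenN : PySem.Str.len name1 = ((n.length : Nat) : Int) := rfl
  have lenLow : PySem.Str.len (PySem.Str.lower name1) = ((n.length : Nat) : Int) := by
    show (((PySem.Str.lower name1).toList.length : Nat) : Int) = _
    rw [hlow, hLlen]
  have neO : (("official" : String) != "topic") = true := by decide
  have neV : (("vevo" : String) != "topic") = true := by decide
  have neT : (("topic" : String) != "topic") = false := by decide
  -- slice evaluations
  have sliceA : ∀ (k : Nat), 0 < k → k ≤ n.length →
      PySem.Str.strip (PySem.Str.slice name1 none (some (-((k : Nat) : Int))))
        = String.ofList (PySem.Chars.strip (n.take (n.length - k))) := by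
    intro k hk0 hk
    rw [PySem.Str.strip, PySem.Str.slice, String.toList_ofList, PySem.Chars.slice_eq_listSlice,
      ← hndef, slice_to_neg _ k hk0 hk]
  have sliceB : ∀ (t : Int) (k : Nat), k ≤ n.length → t = (n.length : Int) - k →
      PySem.Str.strip (PySem.Str.slice name1 none (some t))
        = String.ofList (PySem.Chars.strip (n.take (n.length - k))) := by
    intro t k hk ht
    rw [PySem.Str.strip, PySem.Str.slice, String.toList_ofList, PySem.Chars.slice_eq_listSlice,
      ← hndef, ht, show ((n.length : Int) - k) = (((n.length - k : Nat)) : Int) by omega,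
      slice_to_nonneg _ _ (Int.natCast_nonneg _), Int.toNat_natCast]
  have headto : ∀ (k : Nat), k ≤ n.length →
      (PySem.Str.slice (PySem.Str.lower name1) none (some (((n.length : Nat) : Int) - ((k : Nat) : Int)))).toList
        = L.take (n.length - k) := by
    intro k hk
    rw [PySem.Str.slice, String.toList_ofList, hlow, PySem.Chars.slice_eq_listSlice,
      show (((n.length : Nat) : Int) - ((k : Nat) : Int)) = (((n.length - k : Nat)) : Int) by omega,
      slice_to_nonneg _ _ (Int.natCast_nonneg _), Int.toNat_natCast]
  -- unfold both loops
  simp only [paLoop, paSuffixes, pbLoop, pbWords, lw1, lw2, lw3, lw4, lw5, lw6, lw7, lw8,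
    hEnd, hlow, ← hLdef, tl1, tl2, tl3, tl4, tl5, tl6, tl7, tl8, tl9, tl10, tl11, tl12, tl13,
    ln1, ln2, ln3, ln4, ln5, ln6, ln7, ln8, ln9, ln10, ln11, lenN, lenLow,
    neO, neV, neT, Bool.true_and, Bool.false_and, decide_eq_true_eq]
  -- the three keywords exclude one another as suffixes of L
  have noTO : ¬ (['t','o','p','i','c'] <:+ L ∧ ['o','f','f','i','c','i','a','l'] <:+ L) := by
    rintro ⟨h1, h2⟩
    rcases List.suffix_or_suffix_of_suffix h1 h2 with h | h
    · exact absurd h (by decide)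
    · exact absurd h (by decide)
  have noTV : ¬ (['t','o','p','i','c'] <:+ L ∧ ['v','e','v','o'] <:+ L) := by
    rintro ⟨h1, h2⟩
    rcases List.suffix_or_suffix_of_suffix h1 h2 with h | h
    · exact absurd h (by decide)
    · exact absurd h (by decide)
  have noOV : ¬ (['o','f','f','i','c','i','a','l'] <:+ L ∧ ['v','e','v','o'] <:+ L) := by
    rintro ⟨h1, h2⟩
    rcases List.suffix_or_suffix_of_suffix h1 h2 with h | h
    · exact absurd h (by decide)
    · exact absurd h (by decide)
  by_cases hPt : ['t', 'o', 'p', 'i', 'c'] <:+ L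
  · have h5 : 5 ≤ n.length := by simpa [hLlen] using hPt.length_le
    rw [if_pos hPt, headto 5 h5]
    by_cases hQt : ['-', ' '] <:+ L.take (n.length - 5)
    · have hc2 : ['-', ' ', 't', 'o', 'p', 'i', 'c'] <:+ L := by
        have h := (suffix_split L ['t', 'o', 'p', 'i', 'c'] ['-', ' ']).mpr
          ⟨hPt, by simpa [hLlen] using hQt⟩
        simpa using h
      have h7 : 7 ≤ n.length := by simpa [hLlen] using hc2.length_le
      rw [if_pos hQt]
      by_cases hc1 : [' ', '-', ' ', 't', 'o', 'p', 'i', 'c'] <:+ L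
      · have h8 : 8 ≤ n.length := by simpa [hLlen] using hc1.length_le
        rw [if_pos hc1, sliceA 8 (by omega) h8, sliceB _ 7 h7 (by push_cast; omega)]
        have key := strip_take_eq_of_space_suffix n ['-', ' ', 't', 'o', 'p', 'i', 'c'] (hLdef ▸ hc1)
        simp only [List.length_cons, List.length_nil] at key
        norm_num at key
        rw [key]
      · rw [if_neg hc1, if_pos hc2, sliceA 7 (by omega) h7, sliceB _ 7 h7 (by push_cast; omega)]
    · have hc2 : ¬ (['-', ' ', 't', 'o', 'p', 'i', 'c'] <:+ L) := by
        intro h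
        exact hQt (by simpa [hLlen] using
          ((suffix_split L ['t', 'o', 'p', 'i', 'c'] ['-', ' ']).mp (by simpa using h)).2)
      have hc1 : ¬ ([' ', '-', ' ', 't', 'o', 'p', 'i', 'c'] <:+ L) :=
        fun h => hc2 (List.IsSuffix.trans (by decide) h)
      have hc3 : ¬ ([' ', '-', ' ', 'o', 'f', 'f', 'i', 'c', 'i', 'a', 'l'] <:+ L) :=
        fun h => noTO ⟨hPt, List.IsSuffix.trans (by decide) h⟩
      have hc4 : ¬ (['-', ' ', 'o', 'f', 'f', 'i', 'c', 'i', 'a', 'l'] <:+ L) :=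
        fun h => noTO ⟨hPt, List.IsSuffix.trans (by decide) h⟩
      have hc5 : ¬ ([' ', 'o', 'f', 'f', 'i', 'c', 'i', 'a', 'l'] <:+ L) :=
        fun h => noTO ⟨hPt, List.IsSuffix.trans (by decide) h⟩
      have hc6 : ¬ ([' ', '-', ' ', 'v', 'e', 'v', 'o'] <:+ L) :=
        fun h => noTV ⟨hPt, List.IsSuffix.trans (by decide) h⟩
      have hc7 : ¬ (['-', ' ', 'v', 'e', 'v', 'o'] <:+ L) :=
        fun h => noTV ⟨hPt, List.IsSuffix.trans (by decide) h⟩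
      have hc8 : ¬ ([' ', 'v', 'e', 'v', 'o'] <:+ L) :=
        fun h => noTV ⟨hPt, List.IsSuffix.trans (by decide) h⟩
      rw [if_neg hc1, if_neg hc2, if_neg hc3, if_neg hc4, if_neg hc5, if_neg hc6, if_neg hc7,
        if_neg hc8, if_neg hQt, if_neg (by simp : ¬ (false = true))]
  · rw [if_neg hPt]
    have hc1 : ¬ ([' ', '-', ' ', 't', 'o', 'p', 'i', 'c'] <:+ L) :=
      fun h => hPt (List.IsSuffix.trans (by decide) h)
    have hc2 : ¬ (['-', ' ', 't', 'o', 'p', 'i', 'c'] <:+ L) :=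
      fun h => hPt (List.IsSuffix.trans (by decide) h)
    rw [if_neg hc1, if_neg hc2]
    by_cases hPo : ['o', 'f', 'f', 'i', 'c', 'i', 'a', 'l'] <:+ L
    · have h8 : 8 ≤ n.length := by simpa [hLlen] using hPo.length_le
      rw [if_pos hPo, headto 8 h8]
      have hc6 : ¬ ([' ', '-', ' ', 'v', 'e', 'v', 'o'] <:+ L) :=
        fun h => noOV ⟨hPo, List.IsSuffix.trans (by decide) h⟩
      have hc7 : ¬ (['-', ' ', 'v', 'e', 'v', 'o'] <:+ L) :=
        fun h => noOV ⟨hPo, List.IsSuffix.trans (by decide) h⟩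
      have hc8 : ¬ ([' ', 'v', 'e', 'v', 'o'] <:+ L) :=
        fun h => noOV ⟨hPo, List.IsSuffix.trans (by decide) h⟩
      by_cases hQo2 : ['-', ' '] <:+ L.take (n.length - 8)
      · have hc4 : ['-', ' ', 'o', 'f', 'f', 'i', 'c', 'i', 'a', 'l'] <:+ L := by
          have h := (suffix_split L ['o', 'f', 'f', 'i', 'c', 'i', 'a', 'l'] ['-', ' ']).mpr
            ⟨hPo, by simpa [hLlen] using hQo2⟩
          simpa using h
        have h10 : 10 ≤ n.length := by simpa [hLlen] using hc4.length_le
        rw [if_pos hQo2]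
        by_cases hc3 : [' ', '-', ' ', 'o', 'f', 'f', 'i', 'c', 'i', 'a', 'l'] <:+ L
        · have h11 : 11 ≤ n.length := by simpa [hLlen] using hc3.length_le
          rw [if_pos hc3, sliceA 11 (by omega) h11, sliceB _ 10 h10 (by push_cast; omega)]
          have key := strip_take_eq_of_space_suffix n
            ['-', ' ', 'o', 'f', 'f', 'i', 'c', 'i', 'a', 'l'] (hLdef ▸ hc3)
          simp only [List.length_cons, List.length_nil] at key
          norm_num at key
          rw [key]
        · rw [if_neg hc3, if_pos hc4, sliceA 10 (by omega) h10, sliceB _ 10 h10 (by push_cast; omega)]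
      · have hc4 : ¬ (['-', ' ', 'o', 'f', 'f', 'i', 'c', 'i', 'a', 'l'] <:+ L) := by
          intro h
          exact hQo2 (by simpa [hLlen] using
            ((suffix_split L ['o', 'f', 'f', 'i', 'c', 'i', 'a', 'l'] ['-', ' ']).mp (by simpa using h)).2)
        have hc3 : ¬ ([' ', '-', ' ', 'o', 'f', 'f', 'i', 'c', 'i', 'a', 'l'] <:+ L) :=
          fun h => hc4 (List.IsSuffix.trans (by decide) h)
        rw [if_neg hc3, if_neg hc4, if_neg hQo2]
        by_cases hQo1 : [' '] <:+ L.take (n.length - 8)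
        · have hc5 : [' ', 'o', 'f', 'f', 'i', 'c', 'i', 'a', 'l'] <:+ L := by
            have h := (suffix_split L ['o', 'f', 'f', 'i', 'c', 'i', 'a', 'l'] [' ']).mpr
              ⟨hPo, by simpa [hLlen] using hQo1⟩
            simpa using h
          have h9 : 9 ≤ n.length := by simpa [hLlen] using hc5.length_le
          rw [if_pos hc5, if_pos hQo1, sliceA 9 (by omega) h9, sliceB _ 9 h9 (by push_cast; omega)]
        · have hc5 : ¬ ([' ', 'o', 'f', 'f', 'i', 'c', 'i', 'a', 'l'] <:+ L) := by
            intro h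
            exact hQo1 (by simpa [hLlen] using
              ((suffix_split L ['o', 'f', 'f', 'i', 'c', 'i', 'a', 'l'] [' ']).mp (by simpa using h)).2)
          rw [if_neg hc5, if_neg hc6, if_neg hc7, if_neg hc8, if_neg hQo1]
    · rw [if_neg hPo]
      have hc3 : ¬ ([' ', '-', ' ', 'o', 'f', 'f', 'i', 'c', 'i', 'a', 'l'] <:+ L) :=
        fun h => hPo (List.IsSuffix.trans (by decide) h)
      have hc4 : ¬ (['-', ' ', 'o', 'f', 'f', 'i', 'c', 'i', 'a', 'l'] <:+ L) :=
        fun h => hPo (List.IsSuffix.trans (by decide) h)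
      have hc5 : ¬ ([' ', 'o', 'f', 'f', 'i', 'c', 'i', 'a', 'l'] <:+ L) :=
        fun h => hPo (List.IsSuffix.trans (by decide) h)
      rw [if_neg hc3, if_neg hc4, if_neg hc5]
      by_cases hPv : ['v', 'e', 'v', 'o'] <:+ L
      · have h4 : 4 ≤ n.length := by simpa [hLlen] using hPv.length_le
        rw [if_pos hPv, headto 4 h4]
        by_cases hQv2 : ['-', ' '] <:+ L.take (n.length - 4)
        · have hc7 : ['-', ' ', 'v', 'e', 'v', 'o'] <:+ L := by
            have h := (suffix_split L ['v', 'e', 'v', 'o'] ['-', ' ']).mpr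
              ⟨hPv, by simpa [hLlen] using hQv2⟩
            simpa using h
          have h6 : 6 ≤ n.length := by simpa [hLlen] using hc7.length_le
          rw [if_pos hQv2]
          by_cases hc6 : [' ', '-', ' ', 'v', 'e', 'v', 'o'] <:+ L
          · have h7 : 7 ≤ n.length := by simpa [hLlen] using hc6.length_le
            rw [if_pos hc6, sliceA 7 (by omega) h7, sliceB _ 6 h6 (by push_cast; omega)]
            have key := strip_take_eq_of_space_suffix n ['-', ' ', 'v', 'e', 'v', 'o'] (hLdef ▸ hc6)
            simp only [List.length_cons, List.length_nil] at key
            norm_num at key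
            rw [key]
          · rw [if_neg hc6, if_pos hc7, sliceA 6 (by omega) h6, sliceB _ 6 h6 (by push_cast; omega)]
        · have hc7 : ¬ (['-', ' ', 'v', 'e', 'v', 'o'] <:+ L) := by
            intro h
            exact hQv2 (by simpa [hLlen] using
              ((suffix_split L ['v', 'e', 'v', 'o'] ['-', ' ']).mp (by simpa using h)).2)
          have hc6 : ¬ ([' ', '-', ' ', 'v', 'e', 'v', 'o'] <:+ L) :=
            fun h => hc7 (List.IsSuffix.trans (by decide) h)
          rw [if_neg hc6, if_neg hc7, if_neg hQv2]
          by_cases hQv1 : [' '] <:+ L.take (n.length - 4)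
          · have hc8 : [' ', 'v', 'e', 'v', 'o'] <:+ L := by
              have h := (suffix_split L ['v', 'e', 'v', 'o'] [' ']).mpr
                ⟨hPv, by simpa [hLlen] using hQv1⟩
              simpa using h
            have h5 : 5 ≤ n.length := by simpa [hLlen] using hc8.length_le
            rw [if_pos hc8, if_pos hQv1, sliceA 5 (by omega) h5, sliceB _ 5 h5 (by push_cast; omega)]
          · have hc8 : ¬ ([' ', 'v', 'e', 'v', 'o'] <:+ L) := by
              intro h
              exact hQv1 (by simpa [hLlen] using
                ((suffix_split L ['v', 'e', 'v', 'o'] [' ']).mp (by simpa using h)).2)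
            rw [if_neg hc8, if_neg hQv1]
      · rw [if_neg hPv]
        have hc6 : ¬ ([' ', '-', ' ', 'v', 'e', 'v', 'o'] <:+ L) :=
          fun h => hPv (List.IsSuffix.trans (by decide) h)
        have hc7 : ¬ (['-', ' ', 'v', 'e', 'v', 'o'] <:+ L) :=
          fun h => hPv (List.IsSuffix.trans (by decide) h)
        have hc8 : ¬ ([' ', 'v', 'e', 'v', 'o'] <:+ L) :=
          fun h => hPv (List.IsSuffix.trans (by decide) h)
        rw [if_neg hc6, if_neg hc7, if_neg hc8]

theorem rstripDash_eq : paRstripDash = pbRstripDash := rfl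

theorem blocklist_eq (s : String) :
    ([("Release - Topic" : String), "Topic", "[Topic]"].contains s
      || ([("Release - Topic" : String), "Topic", "[Topic]"].map PySem.Str.lower).contains (PySem.Str.lower s))
    = [("release - topic" : String), "topic", "[topic]"].contains (PySem.Str.lower s) := by
  by_cases h1 : s = "Release - Topic"
  · subst h1; decide
  by_cases h2 : s = "Topic"
  · subst h2; decide
  by_cases h3 : s = "[Topic]"
  · subst h3; decide
  have hc : ([("Release - Topic" : String), "Topic", "[Topic]"].contains s) = false := by
    simp [h1, h2, h3]
  rw [hc, Bool.false_or]
  rfl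

theorem final_guard_eq (s : String) :
    ((s == "") || decide ((PySem.Str.len s : Int) < 2)) = decide ((PySem.Str.len s : Int) < 2) := by
  by_cases h : s = ""
  · subst h; decide
  · have hb : (s == "") = false := by simpa using h
    rw [hb, Bool.false_or]

theorem process_artist_name_py_spec : Claim_equal_process_artist_name_py := by
  intro name _hdom
  unfold Spec_process_artist_name_py process_artist_name_py process_artist_name_py_alt
  by_cases h0 : name = ""
  · subst h0; rfl
  · have hb : (name == "") = false := by simpa using h0
    simp only [hb, Bool.false_eq_true, if_false]
    rw [blocklist_eq (PySem.Str.strip name)]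
    by_cases hblk : ([("release - topic" : String), "topic", "[topic]"].contains
        (PySem.Str.lower (PySem.Str.strip name))) = true
    · rw [if_pos hblk, if_pos hblk]
    · rw [if_neg hblk, if_neg hblk, core_loop (PySem.Str.strip name), rstripDash_eq,
        final_guard_eq]
      simp only [decide_eq_true_eq]
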